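-- pv_equiv track=rewrite | github.com/kmedved/pbpstats | scripts/context_framework.py | _collect_parent_object_routes
-- ===== SOURCE A (Python) =====
-- from collections import defaultdict
-- from typing import Dict, Iterable, List, Optional, Sequence, Tuple
--
-- def _collect_parent_object_routes(
--     loader_routes: Dict[str, Dict[str, List[Dict[str, str]]]]
-- ) -> Dict[str, List[str]]:
--     routes = defaultdict(set)
--     for resource, provider_map in loader_routes.items():
--         for provider, entries in provider_map.items():
--             for entry in entries:
--                 label = "%s (%s)" % (resource, provider)
--                 routes[entry["parent_object"]].add(label)
--     return {
--         parent: sorted(values)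
--         for parent, values in sorted(routes.items(), key=lambda item: item[0])
--     }
-- ===== SOURCE B (Python) =====
-- from itertools import groupby
--
--
-- def _collect_parent_object_routes(loader_routes):
--     pairs = {
--         (entry["parent_object"], "%s (%s)" % (resource, provider))
--         for resource, provider_map in loader_routes.items()
--         for provider, entries in provider_map.items()
--         for entry in entries
--     }
--     return {
--         parent: [label for _, label in group]
--         for parent, group in groupby(sorted(pairs), key=lambda q: q[0])
--     }
-- ===== Notes on version B (the rewrite author's own statement) =====
-- stated objective: alternative
-- what changed: A groups labels per parent into a defaultdict of sets and then sorts the items and each set; B builds one flat set of (parent, label) pairs, sorts it once (tuples compare lexicographically), and produces the result in a single itertools.groupby pass keyed on the parent.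
import Mathlib
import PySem

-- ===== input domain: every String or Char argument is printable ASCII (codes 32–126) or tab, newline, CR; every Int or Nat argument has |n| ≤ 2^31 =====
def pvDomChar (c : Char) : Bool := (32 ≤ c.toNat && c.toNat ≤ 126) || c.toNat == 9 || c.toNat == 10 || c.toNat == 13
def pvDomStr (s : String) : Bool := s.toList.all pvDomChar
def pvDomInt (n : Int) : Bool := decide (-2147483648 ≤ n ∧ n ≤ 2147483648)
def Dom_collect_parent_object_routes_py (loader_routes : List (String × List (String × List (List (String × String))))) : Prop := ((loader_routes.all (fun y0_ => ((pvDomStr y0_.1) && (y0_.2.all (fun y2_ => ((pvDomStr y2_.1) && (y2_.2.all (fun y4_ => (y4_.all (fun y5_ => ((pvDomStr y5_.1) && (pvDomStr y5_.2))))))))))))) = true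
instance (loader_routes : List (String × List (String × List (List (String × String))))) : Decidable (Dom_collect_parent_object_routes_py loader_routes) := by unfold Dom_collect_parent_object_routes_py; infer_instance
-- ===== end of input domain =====

-- B replaces A's defaultdict-of-sets grouping + per-key sorts by one flat set of (parent, label)
-- pairs sorted lexicographically once and a single groupby pass (objective: alternative).
-- Equivalence of the return values is proved on Pre_.

-- ===== PORT A =====
-- A: triple nested loop filling a defaultdict(set) keyed by entry["parent_object"], then a dict
-- comprehension over the items sorted by key, with each value set sorted.
def collect_parent_object_routes_py (loader_routes : List (String × List (String × List (List (String × String))))) : List (String × List String) :=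
  let routes : PySem.Dict String (PySem.Set String) :=
    (PySem.Dict.ofList loader_routes).items.foldl (fun routes rp =>
      (PySem.Dict.ofList rp.2).items.foldl (fun routes pe =>
        pe.2.foldl (fun routes entry =>
          -- routes[entry["parent_object"]].add(label); under Pre_ the key is always present,
          -- so the "" default of getD is never read (Python raises KeyError exactly outside Pre_)
          routes.modify ((PySem.Dict.ofList entry).getD "parent_object" "") []
            (fun s => PySem.Set.add s (rp.1 ++ " (" ++ pe.1 ++ ")"))) routes) routes)
      PySem.Dict.empty
  (PySem.List.sorted routes.items (fun item => item.1)).map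
    (fun it => (it.1, PySem.List.sorted it.2 (fun v => v)))

-- ===== PORT B =====
-- B-side helper: itertools.groupby over a list of (parent, label) pairs, keyed on the parent,
-- with each group's labels listed: a run is the head pair plus the takeWhile of equal parents,
-- and the recursion continues on the dropWhile remainder.
def pvGroupRuns : List (String × String) → List (String × List String)
  | [] => []
  | q :: rest =>
      (q.1, q.2 :: (rest.takeWhile (fun r => r.1 == q.1)).map (fun r => r.2)) ::
      pvGroupRuns (rest.dropWhile (fun r => r.1 == q.1))
termination_by l => l.length
decreasing_by simpa using Nat.lt_succ_of_le (List.length_dropWhile_le _ _)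

-- B: one flat set comprehension of (parent, label) pairs, sorted(pairs) — Python compares the
-- (str, str) tuples LEXICOGRAPHICALLY, which is exactly '<' on Lex (String × String), hence the
-- toLex key — then a single groupby pass building each parent's label list.
def collect_parent_object_routes_py_alt (loader_routes : List (String × List (String × List (List (String × String))))) : List (String × List String) :=
  let pairs : PySem.Set (String × String) :=
    PySem.Set.ofList ((PySem.Dict.ofList loader_routes).items.flatMap (fun rp =>
      (PySem.Dict.ofList rp.2).items.flatMap (fun pe =>
        pe.2.map (fun entry =>
          ((PySem.Dict.ofList entry).getD "parent_object" "", rp.1 ++ " (" ++ pe.1 ++ ")")))))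
  pvGroupRuns (PySem.List.sorted pairs (fun q => toLex q))

-- ===== PRECONDITION & SPEC =====
-- Pre_ excludes exactly the inputs where Python A raises KeyError (B raises there too): some entry
-- dict that the loops actually visit (i.e. after duplicate resource/provider keys are collapsed
-- dict-style) has no "parent_object" key.
def Pre_collect_parent_object_routes_py (loader_routes : List (String × List (String × List (List (String × String))))) : Prop :=
  ((PySem.Dict.ofList loader_routes).items.all (fun rp =>
    (PySem.Dict.ofList rp.2).items.all (fun pe =>
      pe.2.all (fun e => e.any (fun kv => kv.1 == "parent_object"))))) = true
instance (loader_routes : List (String × List (String × List (List (String × String))))) : Decidable (Pre_collect_parent_object_routes_py loader_routes) := by unfold Pre_collect_parent_object_routes_py; infer_instance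

def pvWitness_collect_parent_object_routes_py : (List (String × List (String × List (List (String × String))))) :=
  [("boxscore", [("stats_nba", [[("parent_object", "Game")], [("parent_object", "Period")]]),
                 ("data_nba", [[("parent_object", "Game")]])])]

def Spec_collect_parent_object_routes_py (loader_routes : List (String × List (String × List (List (String × String))))) (out : List (String × List String)) : Prop := out = collect_parent_object_routes_py_alt loader_routes
instance (loader_routes : List (String × List (String × List (List (String × String))))) (out : List (String × List String)) : Decidable (Spec_collect_parent_object_routes_py loader_routes out) := by unfold Spec_collect_parent_object_routes_py; infer_instance

-- ===== CLAIM (what is proved, stated in full; the proofs are below) =====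
def Claim_equal_collect_parent_object_routes_py : Prop := ∀ (loader_routes : List (String × List (String × List (List (String × String))))), Dom_collect_parent_object_routes_py loader_routes → Pre_collect_parent_object_routes_py loader_routes → Spec_collect_parent_object_routes_py loader_routes (collect_parent_object_routes_py loader_routes)

-- ===== LEMMAS AND PROOFS =====

-- The flat (parent, label) pair list both sides reduce to, its sorted distinct parents, and each
-- parent's sorted distinct labels (the canonical form of the common result).
def pvFlat (loader_routes : List (String × List (String × List (List (String × String))))) : List (String × String) :=
  (PySem.Dict.ofList loader_routes).items.flatMap (fun rp =>
    (PySem.Dict.ofList rp.2).items.flatMap (fun pe =>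
      pe.2.map (fun entry =>
        ((PySem.Dict.ofList entry).getD "parent_object" "", rp.1 ++ " (" ++ pe.1 ++ ")"))))

def pvParents (flat : List (String × String)) : List String :=
  PySem.List.sorted (PySem.Set.ofList (flat.map (fun q => q.1))) (fun p => p)

def pvLabels (flat : List (String × String)) (p : String) : List String :=
  PySem.List.sorted (PySem.Set.ofList ((flat.filter (fun q => q.1 == p)).map (fun q => q.2))) (fun l => l)

def pvCanon (flat : List (String × String)) : List (String × List String) :=
  (pvParents flat).map (fun p => (p, pvLabels flat p))

-- What A's grouping fold stores at key p: the fold of Set.add over the labels of p's pairs.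
theorem getD_groupFold (l : List (String × String)) (d : PySem.Dict String (PySem.Set String)) (p : String) :
    (l.foldl (fun d q => d.modify q.1 [] (fun s => PySem.Set.add s q.2)) d).getD p []
      = ((l.filter (fun q => q.1 == p)).map (fun q => q.2)).foldl PySem.Set.add (d.getD p []) := by
  induction l generalizing d with
  | nil => simp
  | cons q t ih =>
    simp only [List.foldl_cons, List.filter_cons]
    rw [ih]
    by_cases h : q.1 = p
    · simp [h, List.foldl_cons]
    · simp [h, PySem.Dict.getD_modify, Ne.symm h]

-- A-side: A's result is the canonical form of its flat pair list.
theorem portA_eq_canon (lr : List (String × List (String × List (List (String × String))))) :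
    collect_parent_object_routes_py lr = pvCanon (pvFlat lr) := by
  unfold collect_parent_object_routes_py pvCanon pvParents
  have hfold :
      (PySem.Dict.ofList lr).items.foldl (fun routes rp =>
        (PySem.Dict.ofList rp.2).items.foldl (fun routes pe =>
          pe.2.foldl (fun routes entry =>
            routes.modify ((PySem.Dict.ofList entry).getD "parent_object" "") []
              (fun s => PySem.Set.add s (rp.1 ++ " (" ++ pe.1 ++ ")"))) routes) routes)
        PySem.Dict.empty
      = (pvFlat lr).foldl (fun d q => d.modify q.1 [] (fun s => PySem.Set.add s q.2)) PySem.Dict.empty := by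
    unfold pvFlat
    rw [List.foldl_flatMap]
    simp only [List.foldl_flatMap, List.foldl_map]
  rw [hfold]
  set pairs := pvFlat lr with hpairs
  set routes := pairs.foldl (fun d q => d.modify q.1 [] (fun s => PySem.Set.add s q.2)) PySem.Dict.empty with hroutes
  have hnd : routes.keys.Nodup := by
    rw [hroutes]
    exact PySem.Dict.nodup_keys_foldl_modify_key pairs (fun q => q.1) []
      (fun _ q => fun s => PySem.Set.add s q.2) PySem.Dict.empty (by simp)
  have hkeys : routes.keys = PySem.Set.ofList (pairs.map (fun q => q.1)) := by
    rw [hroutes,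
      PySem.Dict.keys_foldl_modify_key pairs (fun q => q.1) []
        (fun _ q => fun s => PySem.Set.add s q.2) PySem.Dict.empty]
    simp [PySem.Set.update_nil_left]
  have hget : ∀ p, routes.getD p []
      = PySem.Set.ofList ((pairs.filter (fun q => q.1 == p)).map (fun q => q.2)) := by
    intro p
    rw [hroutes, getD_groupFold, PySem.Dict.getD_empty, ← PySem.Set.ofList_eq_foldl]
  have hitems : routes.items = routes.keys.map (fun k => (k, routes.getD k [])) :=
    PySem.Dict.items_eq_map_keys routes hnd []
  have hsorted :
      PySem.List.sorted routes.items (fun item => item.1)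
        = (PySem.List.sorted (PySem.Set.ofList (pairs.map (fun q => q.1))) (fun p => p)).map
            (fun k => (k, routes.getD k [])) := by
    apply PySem.List.sorted_eq_of_perm_of_pairwise_lt
    · rw [hitems, hkeys]
      exact ((PySem.List.sorted_perm _ _ _).map _)
    · rw [List.pairwise_map]
      exact PySem.List.sorted_ofList_pairwise_lt _
  dsimp only
  rw [hsorted, List.map_map]
  apply List.map_congr_left
  intro k _
  simp only [Function.comp]
  rw [hget k]
  rfl

-- takeWhile/dropWhile of a uniform block followed by pairs with a different parent.
theorem takeWhile_dropWhile_block (p : String) (ls : List String) (rest : List (String × String))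
    (h : ∀ q ∈ rest, (q.1 == p) = false) :
    (ls.map (fun x => (p, x)) ++ rest).takeWhile (fun r => r.1 == p) = ls.map (fun x => (p, x)) ∧
    (ls.map (fun x => (p, x)) ++ rest).dropWhile (fun r => r.1 == p) = rest := by
  induction ls with
  | nil =>
    cases rest with
    | nil => simp
    | cons r t =>
      have := h r (List.mem_cons_self)
      simp [this]
  | cons x xs ih =>
    simp [ih.1, ih.2]

-- groupby over a flat list made of nonempty blocks with pairwise-distinct parents.
theorem groupRuns_flatMap (ps : List String) (f : String → List String)
    (hne : ∀ p ∈ ps, f p ≠ []) (hpw : ps.Pairwise (fun a b => a ≠ b)) :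
    pvGroupRuns (ps.flatMap (fun p => (f p).map (fun x => (p, x)))) = ps.map (fun p => (p, f p)) := by
  induction ps with
  | nil => simp [pvGroupRuns]
  | cons p t ih =>
    obtain ⟨l, ls, hfp⟩ : ∃ l ls, f p = l :: ls := by
      cases hfp : f p with
      | nil => exact absurd hfp (hne p List.mem_cons_self)
      | cons a b => exact ⟨a, b, rfl⟩
    have hrest : ∀ q ∈ t.flatMap (fun p' => (f p').map (fun x => (p', x))), (q.1 == p) = false := by
      intro q hq
      obtain ⟨p', hp', hq'⟩ := List.mem_flatMap.mp hq
      obtain ⟨x, _, rfl⟩ := List.mem_map.mp hq'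
      have : p ≠ p' := (List.pairwise_cons.mp hpw).1 p' hp'
      simpa using Ne.symm this
    obtain ⟨htake, hdrop⟩ := takeWhile_dropWhile_block p ls _ hrest
    rw [List.flatMap_cons, hfp]
    simp only [List.map_cons, List.cons_append]
    rw [pvGroupRuns]
    dsimp only
    rw [htake, hdrop, ih (fun p' hp' => hne p' (List.mem_cons_of_mem _ hp'))
      (List.pairwise_cons.mp hpw).2]
    simp [hfp, List.map_map]

-- labels of a parent that occurs in the flat list are nonempty
theorem pvLabels_ne_nil (flat : List (String × String)) (p : String) (hp : p ∈ flat.map (fun q => q.1)) :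
    pvLabels flat p ≠ [] := by
  unfold pvLabels
  rw [Ne, PySem.List.sorted_eq_nil_iff]
  intro h
  obtain ⟨q, hq, rfl⟩ := List.mem_map.mp hp
  have hmem : q.2 ∈ PySem.Set.ofList ((flat.filter (fun r => r.1 == q.1)).map (fun r => r.2)) :=
    (PySem.Set.mem_ofList _ _).mpr (List.mem_map.mpr ⟨q, List.mem_filter.mpr ⟨hq, by simp⟩, rfl⟩)
  rw [h] at hmem
  simp at hmem

-- B-side: sorting the pair set lexicographically lines the pairs up block by block …
theorem sorted_pairs_eq_blocks (flat : List (String × String)) :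
    PySem.List.sorted (PySem.Set.ofList flat) (fun q => toLex q)
      = (pvParents flat).flatMap (fun p => (pvLabels flat p).map (fun x => (p, x))) := by
  apply PySem.List.sorted_eq_of_perm_of_pairwise_lt
  · -- permutation: both sides are nodup with the same members
    have hpw : ((pvParents flat).flatMap (fun p => (pvLabels flat p).map (fun x => (p, x)))).Pairwise
        (fun a b => (toLex a : Lex (String × String)) < toLex b) := by
      rw [List.pairwise_flatMap]
      constructor
      · intro p _
        rw [List.pairwise_map]
        refine (PySem.List.sorted_ofList_pairwise_lt _).imp ?_
        intro a b hab
        exact Prod.Lex.lt_iff.mpr (Or.inr ⟨rfl, hab⟩)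
      · refine (PySem.List.sorted_ofList_pairwise_lt _).imp ?_
        intro a b hab x hx y hy
        obtain ⟨xa, _, rfl⟩ := List.mem_map.mp hx
        obtain ⟨ya, _, rfl⟩ := List.mem_map.mp hy
        exact Prod.Lex.lt_iff.mpr (Or.inl hab)
    refine (List.perm_ext_iff_of_nodup (hpw.imp fun h => ?_) (PySem.Set.nodup_ofList _)).mpr ?_
    · intro hEq; exact absurd h (by rw [hEq]; exact lt_irrefl _)
    · intro q
      rw [PySem.Set.mem_ofList, List.mem_flatMap]
      constructor
      · rintro ⟨p, hp, hq⟩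
        obtain ⟨x, hx, rfl⟩ := List.mem_map.mp hq
        unfold pvLabels at hx
        rw [PySem.List.mem_sorted, PySem.Set.mem_ofList] at hx
        obtain ⟨r, hr, rfl⟩ := List.mem_map.mp hx
        have hr' := List.mem_filter.mp hr
        have : r.1 = p := by simpa using hr'.2
        rw [← this]
        exact hr'.1
      · intro hq
        refine ⟨q.1, ?_, ?_⟩
        · unfold pvParents
          rw [PySem.List.mem_sorted, PySem.Set.mem_ofList]
          exact List.mem_map.mpr ⟨q, hq, rfl⟩
        · refine List.mem_map.mpr ⟨q.2, ?_, rfl⟩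
          unfold pvLabels
          rw [PySem.List.mem_sorted, PySem.Set.mem_ofList]
          exact List.mem_map.mpr ⟨q, List.mem_filter.mpr ⟨hq, by simp⟩, rfl⟩
  · -- strict lexicographic increase (re-proved here because `refine` above consumed it per goal)
    rw [List.pairwise_flatMap]
    constructor
    · intro p _
      rw [List.pairwise_map]
      refine (PySem.List.sorted_ofList_pairwise_lt _).imp ?_
      intro a b hab
      exact Prod.Lex.lt_iff.mpr (Or.inr ⟨rfl, hab⟩)
    · refine (PySem.List.sorted_ofList_pairwise_lt _).imp ?_
      intro a b hab x hx y hy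
      obtain ⟨xa, _, rfl⟩ := List.mem_map.mp hx
      obtain ⟨ya, _, rfl⟩ := List.mem_map.mp hy
      exact Prod.Lex.lt_iff.mpr (Or.inl hab)

-- B-side: B's result is the same canonical form.
theorem portB_eq_canon (lr : List (String × List (String × List (List (String × String))))) :
    collect_parent_object_routes_py_alt lr = pvCanon (pvFlat lr) := by
  show pvGroupRuns (PySem.List.sorted (PySem.Set.ofList (pvFlat lr)) (fun q => toLex q))
      = pvCanon (pvFlat lr)
  rw [sorted_pairs_eq_blocks]
  unfold pvCanon
  apply groupRuns_flatMap
  · intro p hp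
    apply pvLabels_ne_nil
    unfold pvParents at hp
    rw [PySem.List.mem_sorted, PySem.Set.mem_ofList] at hp
    exact hp
  · exact (PySem.List.sorted_ofList_pairwise_lt _).imp (fun h => ne_of_lt h)

-- ===== VERDICT (by name: the statement is the Claim_ definition above) =====
theorem collect_parent_object_routes_py_spec : Claim_equal_collect_parent_object_routes_py := by
  intro lr _ _
  unfold Spec_collect_parent_object_routes_py
  rw [portA_eq_canon, portB_eq_canon]
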